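-- pv_equiv track=rewrite | github.com/OscarTsao/LLM_Projects | analyze_experiments_enhanced.py | classify_task_and_mode
-- ===== SOURCE A (Python) =====
-- from typing import Dict, List, Optional, Any
--
-- def classify_task_and_mode(metrics: Dict) -> tuple[str, str]:
--     """根據指標分類任務類型和單/多任務模式"""
--
--     # 檢查是否為 multi-task (同時有 criteria 和 evidence)
--     has_criteria = any(k.startswith(('criteria_', 'test_cri_', 'val_cri_')) for k in metrics.keys())
--     has_evidence_sentence = any(k.startswith(('evidence_', 'test_ev_', 'val_ev_')) for k in metrics.keys())
--     has_evidence_span = any('span' in k for k in metrics.keys())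
--     has_symptom = any('symptom' in k for k in metrics.keys())
--
--     if has_criteria and (has_evidence_sentence or has_evidence_span):
--         task_type = "multi_task_criteria_evidence"
--         single_vs_multi = "multi"
--     elif has_evidence_span:
--         task_type = "evidence_span"
--         single_vs_multi = "single"
--     elif has_evidence_sentence:
--         task_type = "evidence_sentence"
--         single_vs_multi = "single"
--     elif has_criteria:
--         task_type = "criteria_matching"
--         single_vs_multi = "single"
--     elif has_symptom:
--         task_type = "symptom_classification"
--         single_vs_multi = "single"
--     else:
--         task_type = "unknown"
--         single_vs_multi = "unknown"
--
--     return task_type, single_vs_multi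
-- ===== SOURCE B (Python) =====
-- # Table-driven reimplementation: each key contributes a 4-bit mask (criteria=1,
-- # evidence-sentence=2, span=4, symptom=8); the OR of all masks indexes a
-- # precomputed 16-entry outcome table, eliminating the if/elif chain entirely.
--
-- _TABLE = [
--     ("unknown", "unknown"),                    # 0000
--     ("criteria_matching", "single"),           # 0001 c
--     ("evidence_sentence", "single"),           # 0010 e
--     ("multi_task_criteria_evidence", "multi"), # 0011 c,e
--     ("evidence_span", "single"),               # 0100 p
--     ("multi_task_criteria_evidence", "multi"), # 0101 c,p
--     ("evidence_span", "single"),               # 0110 e,p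
--     ("multi_task_criteria_evidence", "multi"), # 0111
--     ("symptom_classification", "single"),      # 1000 s
--     ("criteria_matching", "single"),           # 1001 c,s
--     ("evidence_sentence", "single"),           # 1010 e,s
--     ("multi_task_criteria_evidence", "multi"), # 1011
--     ("evidence_span", "single"),               # 1100 p,s
--     ("multi_task_criteria_evidence", "multi"), # 1101
--     ("evidence_span", "single"),               # 1110
--     ("multi_task_criteria_evidence", "multi"), # 1111
-- ]
--
-- def classify_task_and_mode(metrics):
--     mask = 0
--     for k in metrics.keys():
--         mask |= (k.startswith(('criteria_', 'test_cri_', 'val_cri_'))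
--                  | (k.startswith(('evidence_', 'test_ev_', 'val_ev_')) << 1)
--                  | (('span' in k) << 2)
--                  | (('symptom' in k) << 3))
--     return _TABLE[mask]
-- ===== Notes on version B (the rewrite author's own statement) =====
-- stated objective: alternative
-- what changed: Replaces the four any(...) scans and the if/elif priority chain with a single pass OR-accumulating a 4-bit mask per key and a precomputed 16-entry lookup table giving the (task_type, mode) outcome directly.
import Mathlib
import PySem

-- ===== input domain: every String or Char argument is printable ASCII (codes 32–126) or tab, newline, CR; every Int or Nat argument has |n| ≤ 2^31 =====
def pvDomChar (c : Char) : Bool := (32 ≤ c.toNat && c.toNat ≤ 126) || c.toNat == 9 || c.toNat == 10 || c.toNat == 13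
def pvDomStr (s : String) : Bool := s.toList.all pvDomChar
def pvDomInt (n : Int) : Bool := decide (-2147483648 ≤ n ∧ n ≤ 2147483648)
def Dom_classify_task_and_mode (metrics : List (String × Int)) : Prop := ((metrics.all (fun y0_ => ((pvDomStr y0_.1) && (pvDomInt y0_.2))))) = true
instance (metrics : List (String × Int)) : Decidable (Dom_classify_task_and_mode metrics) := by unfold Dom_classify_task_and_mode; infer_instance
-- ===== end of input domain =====

-- B replaces the four any(...) scans + if/elif chain by one pass OR-ing a 4-bit mask per key and a 16-entry lookup table; same outputs.

-- ===== PORT A =====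
-- k.startswith(('criteria_', 'test_cri_', 'val_cri_'))
def pvIsCri (k : String) : Bool :=
  PySem.Str.startswith k "criteria_" || PySem.Str.startswith k "test_cri_" || PySem.Str.startswith k "val_cri_"
-- k.startswith(('evidence_', 'test_ev_', 'val_ev_'))
def pvIsEv (k : String) : Bool :=
  PySem.Str.startswith k "evidence_" || PySem.Str.startswith k "test_ev_" || PySem.Str.startswith k "val_ev_"
-- 'span' in k
def pvHasSpan (k : String) : Bool := PySem.Str.isIn "span" k
-- 'symptom' in k
def pvHasSym (k : String) : Bool := PySem.Str.isIn "symptom" k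

def classify_task_and_mode (metrics : List (String × Int)) : String × String :=
  let has_criteria := metrics.any (fun kv => pvIsCri kv.1)
  let has_evidence_sentence := metrics.any (fun kv => pvIsEv kv.1)
  let has_evidence_span := metrics.any (fun kv => pvHasSpan kv.1)
  let has_symptom := metrics.any (fun kv => pvHasSym kv.1)
  if has_criteria && (has_evidence_sentence || has_evidence_span) then
    ("multi_task_criteria_evidence", "multi")
  else if has_evidence_span then ("evidence_span", "single")
  else if has_evidence_sentence then ("evidence_sentence", "single")
  else if has_criteria then ("criteria_matching", "single")
  else if has_symptom then ("symptom_classification", "single")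
  else ("unknown", "unknown")

-- ===== PORT B =====
-- the 4-bit contribution of one key (bool | bool<<1 | bool<<2 | bool<<3 in Source B)
def pvKeyMask (k : String) : Nat :=
  (if pvIsCri k then 1 else 0) |||
  (if pvIsEv k then 2 else 0) |||
  (if pvHasSpan k then 4 else 0) |||
  (if pvHasSym k then 8 else 0)

-- the _TABLE of Source B, indexed by the OR of all key masks
def pvTable : List (String × String) :=
  [ ("unknown", "unknown"),
    ("criteria_matching", "single"),
    ("evidence_sentence", "single"),
    ("multi_task_criteria_evidence", "multi"),
    ("evidence_span", "single"),
    ("multi_task_criteria_evidence", "multi"),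
    ("evidence_span", "single"),
    ("multi_task_criteria_evidence", "multi"),
    ("symptom_classification", "single"),
    ("criteria_matching", "single"),
    ("evidence_sentence", "single"),
    ("multi_task_criteria_evidence", "multi"),
    ("evidence_span", "single"),
    ("multi_task_criteria_evidence", "multi"),
    ("evidence_span", "single"),
    ("multi_task_criteria_evidence", "multi") ]

def classify_task_and_mode_alt (metrics : List (String × Int)) : String × String :=
  let mask := metrics.foldl (fun m kv => m ||| pvKeyMask kv.1) 0
  pvTable.getD mask ("unknown", "unknown")

-- ===== PRECONDITION & SPEC =====
def Spec_classify_task_and_mode (metrics : List (String × Int)) (out : String × String) : Prop := out = classify_task_and_mode_alt metrics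
instance (metrics : List (String × Int)) (out : String × String) : Decidable (Spec_classify_task_and_mode metrics out) := by unfold Spec_classify_task_and_mode; infer_instance

-- ===== CLAIM (what is proved, stated in full; the proofs are below) =====
def Claim_equal_classify_task_and_mode : Prop := ∀ (metrics : List (String × Int)), Dom_classify_task_and_mode metrics → Spec_classify_task_and_mode metrics (classify_task_and_mode metrics)

-- ===== LEMMAS AND PROOFS =====

-- the encoding of four flags as a 4-bit mask
def pvEnc (a b c d : Bool) : Nat :=
  (if a then 1 else 0) ||| (if b then 2 else 0) ||| (if c then 4 else 0) ||| (if d then 8 else 0)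

-- pulling the accumulator out of the OR-fold
theorem pvFold_or (metrics : List (String × Int)) (m0 : Nat) :
    metrics.foldl (fun m kv => m ||| pvKeyMask kv.1) m0
      = m0 ||| metrics.foldl (fun m kv => m ||| pvKeyMask kv.1) 0 := by
  induction metrics generalizing m0 with
  | nil => simp
  | cons kv t ih =>
    simp only [List.foldl_cons]
    rw [ih (m0 ||| pvKeyMask kv.1), ih (0 ||| pvKeyMask kv.1)]
    simp [Nat.or_assoc]

-- the OR of the key masks encodes exactly the four any-scans
theorem pvFold_enc (metrics : List (String × Int)) :
    metrics.foldl (fun m kv => m ||| pvKeyMask kv.1) 0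
      = pvEnc (metrics.any (fun kv => pvIsCri kv.1)) (metrics.any (fun kv => pvIsEv kv.1))
              (metrics.any (fun kv => pvHasSpan kv.1)) (metrics.any (fun kv => pvHasSym kv.1)) := by
  induction metrics with
  | nil => decide
  | cons kv t ih =>
    simp only [List.foldl_cons, Nat.zero_or, List.any_cons]
    rw [pvFold_or, ih]
    unfold pvKeyMask pvEnc
    cases pvIsCri kv.1 <;> cases pvIsEv kv.1 <;> cases pvHasSpan kv.1 <;> cases pvHasSym kv.1 <;>
      cases t.any (fun kv => pvIsCri kv.1) <;> cases t.any (fun kv => pvIsEv kv.1) <;>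
      cases t.any (fun kv => pvHasSpan kv.1) <;> cases t.any (fun kv => pvHasSym kv.1) <;> decide

-- the table agrees with A's priority chain on all 16 masks
theorem pvTable_chain (a b c d : Bool) :
    pvTable.getD (pvEnc a b c d) ("unknown", "unknown")
      = (if a && (b || c) then ("multi_task_criteria_evidence", "multi") else
         if c then ("evidence_span", "single") else
         if b then ("evidence_sentence", "single") else
         if a then ("criteria_matching", "single") else
         if d then ("symptom_classification", "single") else ("unknown", "unknown")) := by
  cases a <;> cases b <;> cases c <;> cases d <;> decide

theorem classify_task_and_mode_eq (metrics : List (String × Int)) :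
    classify_task_and_mode metrics = classify_task_and_mode_alt metrics := by
  unfold classify_task_and_mode classify_task_and_mode_alt
  rw [pvFold_enc, pvTable_chain]

-- ===== VERDICT (by name: the statement is the Claim_ definition above) =====
theorem classify_task_and_mode_spec : Claim_equal_classify_task_and_mode := by
  intro metrics _
  unfold Spec_classify_task_and_mode
  exact classify_task_and_mode_eq metrics
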